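-- pv_equiv track=rewrite | github.com/NeapolitanIcecream/barcarolle | experiments/core_narrative/tools/barcarolle_patch_command.py | extract_inline_diff
-- ===== SOURCE A (Python) =====
-- def extract_inline_diff(text: str) -> str | None:
--     lines = text.splitlines()
--     for index, line in enumerate(lines):
--         if line.startswith("diff --git "):
--             return "\n".join(lines[index:]).strip() + "\n"
--     for index, line in enumerate(lines):
--         if line.startswith("--- ") and any(candidate.startswith("+++ ") for candidate in lines[index + 1 : index + 4]):
--             return "\n".join(lines[index:]).strip() + "\n"
--     return None
-- ===== SOURCE B (Python) =====
-- def extract_inline_diff(text: str) -> str | None: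
--     lines = text.splitlines()
--     first_diff_index = None
--     first_dash_index = None
--     for index, line in enumerate(lines):
--         if first_diff_index is None and line.startswith("diff --git "):
--             first_diff_index = index
--             break
--         if first_dash_index is None and line.startswith("--- ") and any(
--             candidate.startswith("+++ ") for candidate in lines[index + 1 : index + 4]
--         ):
--             first_dash_index = index
--     start = first_diff_index if first_diff_index is not None else first_dash_index
--     if start is None:
--         return None
--     return "\n".join(lines[start:]).strip() + "\n"
-- ===== Notes on version B (the rewrite author's own statement) =====
-- stated objective: alternative
-- what changed: A's two full scans over the lines (one for 'diff --git ', then a second for a '--- '/'+++ ' pair) are fused into a single loop that records the first index of each kind, breaks as soon as a 'diff --git ' line is seen, and formats once after the loop with the diff index taking priority.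
import Mathlib
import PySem

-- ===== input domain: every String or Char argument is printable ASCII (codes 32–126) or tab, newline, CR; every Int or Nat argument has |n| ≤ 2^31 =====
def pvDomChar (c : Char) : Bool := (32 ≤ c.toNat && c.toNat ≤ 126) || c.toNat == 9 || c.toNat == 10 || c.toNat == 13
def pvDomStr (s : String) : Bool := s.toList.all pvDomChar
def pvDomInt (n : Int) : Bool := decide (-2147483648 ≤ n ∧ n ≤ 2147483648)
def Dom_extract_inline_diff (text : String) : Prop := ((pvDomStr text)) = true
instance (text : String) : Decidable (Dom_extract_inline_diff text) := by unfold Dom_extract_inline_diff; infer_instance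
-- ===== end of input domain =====

-- B replaces A's two full scans of the lines by one loop that records the first
-- 'diff --git ' line and the first valid '--- ' line and stops as soon as a
-- 'diff --git ' line is seen (objective: alternative decomposition, same cost).

-- ===== PORT A =====
-- A's first 'for' loop: return formatted tail at the first 'diff --git ' line.
def pvA_loop1 (lines : List String) : List (Int × String) → Option String
  | [] => none
  | (index, line) :: rest =>
    if PySem.Str.startswith line "diff --git " then
      some (PySem.Str.strip (PySem.Str.join "\n" (PySem.List.slice lines (some index) none)) ++ "\n")
    else pvA_loop1 lines rest

-- A's second 'for' loop: first '--- ' line with a '+++ ' line within the next 3.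
def pvA_loop2 (lines : List String) : List (Int × String) → Option String
  | [] => none
  | (index, line) :: rest =>
    if PySem.Str.startswith line "--- " &&
       (PySem.List.slice lines (some (index + 1)) (some (index + 4))).any
         (fun candidate => PySem.Str.startswith candidate "+++ ") then
      some (PySem.Str.strip (PySem.Str.join "\n" (PySem.List.slice lines (some index) none)) ++ "\n")
    else pvA_loop2 lines rest

def extract_inline_diff (text : String) : Option String :=
  let lines := PySem.Str.splitlines text
  match pvA_loop1 lines (PySem.List.enumerate lines 0) with
  | some r => some r
  | none => pvA_loop2 lines (PySem.List.enumerate lines 0)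

-- ===== PORT B =====
-- Source B's single loop: returns (first_diff_index, first_dash_index); breaks on the first diff line.
def pvB_loop (lines : List String) : List (Int × String) → Option Int × Option Int → Option Int × Option Int
  | [], st => st
  | (index, line) :: rest, (fd, fs) =>
    if fd.isNone && PySem.Str.startswith line "diff --git " then
      (some index, fs)
    else if fs.isNone && PySem.Str.startswith line "--- " &&
            (PySem.List.slice lines (some (index + 1)) (some (index + 4))).any
              (fun candidate => PySem.Str.startswith candidate "+++ ") then
      pvB_loop lines rest (fd, some index)
    else pvB_loop lines rest (fd, fs)

def extract_inline_diff_alt (text : String) : Option String :=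
  let lines := PySem.Str.splitlines text
  let st := pvB_loop lines (PySem.List.enumerate lines 0) (none, none)
  let start := match st.1 with
    | some i => some i
    | none => st.2
  match start with
  | none => none
  | some i =>
    some (PySem.Str.strip (PySem.Str.join "\n" (PySem.List.slice lines (some i) none)) ++ "\n")

-- ===== PRECONDITION & SPEC =====
def Spec_extract_inline_diff (text : String) (out : Option String) : Prop := out = extract_inline_diff_alt text
instance (text : String) (out : Option String) : Decidable (Spec_extract_inline_diff text out) := by unfold Spec_extract_inline_diff; infer_instance

-- ===== CLAIM (what is proved, stated in full; the proofs are below) =====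
def Claim_equal_extract_inline_diff : Prop := ∀ (text : String), Dom_extract_inline_diff text → Spec_extract_inline_diff text (extract_inline_diff text)

-- ===== LEMMAS AND PROOFS =====

-- Formatting shared by every return of both programs.
def pvFmt (lines : List String) (i : Int) : String :=
  PySem.Str.strip (PySem.Str.join "\n" (PySem.List.slice lines (some i) none)) ++ "\n"

-- Render B's final state as B does after the loop.
def pvRender (lines : List String) : Option Int × Option Int → Option String
  | (some i, _) => some (pvFmt lines i)
  | (none, some i) => some (pvFmt lines i)
  | (none, none) => none

-- Core invariant: starting from (none, fs), B's loop over any suffix e agrees with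
-- A's loop1 over e, falling back to fs, and then to A's loop2 over e.
theorem pvB_loop_eq (lines : List String) (e : List (Int × String)) :
    ∀ fs : Option Int,
      pvRender lines (pvB_loop lines e (none, fs)) =
        match pvA_loop1 lines e with
        | some r => some r
        | none =>
          match fs with
          | some i => some (pvFmt lines i)
          | none => pvA_loop2 lines e := by
  induction e with
  | nil => intro fs; cases fs <;> rfl
  | cons hd rest ih =>
    intro fs
    obtain ⟨index, line⟩ := hd
    cases hdiff : PySem.Str.startswith line "diff --git " with
    | true =>
      cases fs <;>
        simp only [pvB_loop, pvA_loop1, Option.isNone_none, Bool.true_and, hdiff,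
          reduceIte, pvRender, pvFmt]
    | false =>
      cases hdash : (PySem.Str.startswith line "--- " &&
          (PySem.List.slice lines (some (index + 1)) (some (index + 4))).any
            (fun candidate => PySem.Str.startswith candidate "+++ ")) with
      | true =>
        cases fs with
        | none =>
          simp only [pvB_loop, pvA_loop1, pvA_loop2, Option.isNone_none, Bool.true_and,
            hdiff, hdash]
          simpa [pvFmt] using ih (some index)
        | some j =>
          simp only [pvB_loop, pvA_loop1, Option.isNone_none, Option.isNone_some,
            Bool.true_and, Bool.false_and, hdiff]
          simpa [pvFmt] using ih (some j)
      | false =>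
        cases fs with
        | none =>
          simp only [pvB_loop, pvA_loop1, pvA_loop2, Option.isNone_none, Bool.true_and,
            hdiff, hdash]
          simpa [pvFmt] using ih none
        | some j =>
          simp only [pvB_loop, pvA_loop1, Option.isNone_none, Option.isNone_some,
            Bool.true_and, Bool.false_and, hdiff]
          simpa [pvFmt] using ih (some j)

-- ===== VERDICT (by name: the statement is the Claim_ definition above) =====
theorem extract_inline_diff_spec : Claim_equal_extract_inline_diff := by
  intro text _
  unfold Spec_extract_inline_diff extract_inline_diff extract_inline_diff_alt
  have h := pvB_loop_eq (PySem.Str.splitlines text)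
    (PySem.List.enumerate (PySem.Str.splitlines text) 0) none
  simp only [pvRender, pvFmt] at h
  rcases hb : pvB_loop (PySem.Str.splitlines text)
      (PySem.List.enumerate (PySem.Str.splitlines text) 0) (none, none) with ⟨fd, fs⟩
  rw [hb] at h
  cases fd <;> cases fs <;> simp_all
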